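-- pv_equiv track=rewrite | github.com/cnotley/code-agent-workflow | scripts/utils.py | _filter_diff
-- ===== SOURCE A (Python) =====
-- from typing import Dict, Any, List, Optional, Iterable
--
-- def _filter_diff(diff_contents: str) -> str:
--     if not diff_contents.strip():
--         return diff_contents
--
--     exclude_tokens = {
--         "script1_model_a_init.py",
--         "script2_model_b_init.py",
--         "script3_model_b_capture.py",
--         "utils.py",
--         "README.md",
--         ".claude/",
--         ".snapshot-exclude",
--     }
--
--     filtered_lines: List[str] = []
--     skip_block = False
--     for line in diff_contents.splitlines():
--         if line.startswith("diff --git"):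
--             skip_block = any(token in line for token in exclude_tokens)
--         if not skip_block:
--             filtered_lines.append(line)
--
--     return "\n".join(filtered_lines) + ("\n" if filtered_lines else "")
-- ===== SOURCE B (Python) =====
-- from typing import List
--
-- def _filter_diff(diff_contents: str) -> str:
--     if not diff_contents.strip():
--         return diff_contents
--
--     exclude_tokens = {
--         "script1_model_a_init.py",
--         "script2_model_b_init.py",
--         "script3_model_b_capture.py",
--         "utils.py",
--         "README.md",
--         ".claude/",
--         ".snapshot-exclude",
--     }
--
--     # Pass 1: partition into consecutive blocks, each starting at a 'diff --git'
--     # header (plus one leading block of pre-header lines, possibly empty).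
--     blocks: List[List[str]] = []
--     current: List[str] = []
--     for line in diff_contents.splitlines():
--         if line.startswith("diff --git"):
--             blocks.append(current)
--             current = [line]
--         else:
--             current.append(line)
--     blocks.append(current)
--
--     # Pass 2: keep a block unless its header matches an excluded token.
--     kept: List[str] = []
--     for block in blocks:
--         if block and block[0].startswith("diff --git") and any(
--             token in block[0] for token in exclude_tokens
--         ):
--             continue
--         kept.extend(block)
--
--     return "\n".join(kept) + ("\n" if kept else "")
-- ===== Notes on version B (the rewrite author's own statement) =====
-- stated objective: alternative
-- what changed: Replaces A's single stateful scan with a skip flag by a two-pass group-then-filter: lines are first partitioned into consecutive diff blocks, then whole blocks are kept or dropped by their header and flattened back.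
import Mathlib
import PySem

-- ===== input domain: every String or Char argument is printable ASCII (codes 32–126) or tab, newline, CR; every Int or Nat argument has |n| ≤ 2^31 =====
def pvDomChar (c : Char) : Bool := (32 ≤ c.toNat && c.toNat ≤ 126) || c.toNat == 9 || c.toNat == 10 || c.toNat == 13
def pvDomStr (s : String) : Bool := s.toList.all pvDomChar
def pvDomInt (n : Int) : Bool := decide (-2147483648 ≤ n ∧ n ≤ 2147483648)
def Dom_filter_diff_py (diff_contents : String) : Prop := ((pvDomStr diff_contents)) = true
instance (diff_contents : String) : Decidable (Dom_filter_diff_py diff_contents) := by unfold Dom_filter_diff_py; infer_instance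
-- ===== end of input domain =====

-- B replaces A's one stateful scan with a skip flag by a two-pass group-then-filter
-- over whole diff blocks (alternative decomposition, same cost).

-- the exclude_tokens set literal (identical in both Pythons; `any` over it is order-independent)
def pvTokens : List String :=
  ["script1_model_a_init.py", "script2_model_b_init.py", "script3_model_b_capture.py",
   "utils.py", "README.md", ".claude/", ".snapshot-exclude"]

-- `any(token in line for token in exclude_tokens)` (shared by both ports, as by both Pythons)
def pvExcluded (line : String) : Bool := pvTokens.any (fun t => PySem.Str.isIn t line)

-- ===== PORT A =====
def filter_diff_py (diff_contents : String) : String :=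
  if PySem.Str.strip diff_contents = "" then diff_contents
  else
    let st := (PySem.Str.splitlines diff_contents).foldl
      (fun (st : List String × Bool) line =>
        let skip := if PySem.Str.startswith line "diff --git" then pvExcluded line else st.2
        ((if skip then st.1 else st.1 ++ [line]), skip))
      ([], false)
    PySem.Str.join "\n" st.1 ++ (if st.1.isEmpty then "" else "\n")

-- ===== PORT B =====
-- `if block and block[0].startswith("diff --git") and any(...): continue`
def pvKeep (block : List String) : Bool :=
  match block with
  | [] => true
  | h :: _ => !(PySem.Str.startswith h "diff --git" && pvExcluded h)

def filter_diff_py_alt (diff_contents : String) : String :=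
  if PySem.Str.strip diff_contents = "" then diff_contents
  else
    let st := (PySem.Str.splitlines diff_contents).foldl
      (fun (st : List (List String) × List String) line =>
        if PySem.Str.startswith line "diff --git" then (st.1 ++ [st.2], [line])
        else (st.1, st.2 ++ [line]))
      ([], [])
    let blocks := st.1 ++ [st.2]
    let kept := blocks.foldl (fun acc b => if pvKeep b then acc ++ b else acc) []
    PySem.Str.join "\n" kept ++ (if kept.isEmpty then "" else "\n")

-- ===== PRECONDITION & SPEC =====
def Spec_filter_diff_py (diff_contents : String) (out : String) : Prop := out = filter_diff_py_alt diff_contents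
instance (diff_contents : String) (out : String) : Decidable (Spec_filter_diff_py diff_contents out) := by unfold Spec_filter_diff_py; infer_instance

-- ===== CLAIM (what is proved, stated in full; the proofs are below) =====
def Claim_equal_filter_diff_py : Prop := ∀ (diff_contents : String), Dom_filter_diff_py diff_contents → Spec_filter_diff_py diff_contents (filter_diff_py diff_contents)

-- ===== LEMMAS AND PROOFS =====

-- B's second pass computes the flattened kept blocks
lemma keep_fold_eq (blocks : List (List String)) (acc : List String) :
    blocks.foldl (fun acc b => if pvKeep b then acc ++ b else acc) acc
      = acc ++ (blocks.filter pvKeep).flatten := by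
  induction blocks generalizing acc with
  | nil => simp
  | cons b bs ih =>
    simp only [List.foldl_cons, List.filter_cons]
    by_cases h : pvKeep b = true <;> simp [h, ih, List.append_assoc]

-- main loop invariant: A's accumulated lines = flattened kept finished blocks ++ current block if kept
lemma loop_eq (lines : List String) (accA : List String) (skip : Bool)
    (blocks : List (List String)) (current : List String)
    (hskip : skip = !pvKeep current)
    (hacc : accA = (blocks.filter pvKeep).flatten ++ (if pvKeep current then current else [])) :
    (lines.foldl
      (fun (st : List String × Bool) line =>
        let skip := if PySem.Str.startswith line "diff --git" then pvExcluded line else st.2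
        ((if skip then st.1 else st.1 ++ [line]), skip))
      (accA, skip)).1
    = ((((lines.foldl
        (fun (st : List (List String) × List String) line =>
          if PySem.Str.startswith line "diff --git" then (st.1 ++ [st.2], [line])
          else (st.1, st.2 ++ [line]))
        (blocks, current)).1
        ++ [(lines.foldl
        (fun (st : List (List String) × List String) line =>
          if PySem.Str.startswith line "diff --git" then (st.1 ++ [st.2], [line])
          else (st.1, st.2 ++ [line]))
        (blocks, current)).2]).filter pvKeep).flatten) := by
  induction lines generalizing accA skip blocks current with
  | nil =>
    simp only [List.foldl_nil, hacc, List.filter_append, List.flatten_append]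
    by_cases h : pvKeep current = true <;> simp [h]
  | cons l ls ih =>
    simp only [List.foldl_cons]
    by_cases hd : PySem.Str.startswith l "diff --git" = true
    · simp only [hd, if_true]
      simp at hd
      apply ih
      · simp [pvKeep, hd]
      · have hkl : pvKeep [l] = !pvExcluded l := by simp [pvKeep, hd]
        simp only [List.filter_append, List.flatten_append, hacc]
        by_cases he : pvExcluded l = true <;> by_cases hc : pvKeep current = true <;>
          simp [he, hc, hkl, List.append_assoc]
    · have hd' : PySem.Str.startswith l "diff --git" = false := by
        cases hsw : PySem.Str.startswith l "diff --git" with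
        | false => rfl
        | true => exact absurd hsw hd
      have hk1 : pvKeep [l] = true := by
        simp only [pvKeep, hd', Bool.false_and, Bool.not_false]
      simp only [hd, if_false, Bool.false_eq_true]
      apply ih
      · cases current with
        | nil => simp only [List.nil_append, hk1]; exact hskip
        | cons h t => exact hskip
      · cases current with
        | nil =>
          have hs : skip = false := hskip
          have hk0 : pvKeep ([] : List String) = true := rfl
          simp [hacc, hs, hk0, hk1]
        | cons h t =>
          have hk : pvKeep (h :: (t ++ [l])) = pvKeep (h :: t) := rfl
          rw [hskip]
          by_cases hkh : pvKeep (h :: t) = true <;>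
            simp [hacc, hk, hkh, List.append_assoc]

-- ===== VERDICT (by name: the statement is the Claim_ definition above) =====
theorem filter_diff_py_spec : Claim_equal_filter_diff_py := by
  intro s _
  show filter_diff_py s = filter_diff_py_alt s
  unfold filter_diff_py filter_diff_py_alt
  by_cases h : PySem.Str.strip s = "" 
  · simp [h]
  · simp only [h, if_false]
    have := loop_eq (PySem.Str.splitlines s) [] false [] [] (by simp [pvKeep]) (by simp)
    rw [keep_fold_eq]
    simp only [List.nil_append]
    rw [this]
    rfl
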